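-- pv_equiv track=rewrite | github.com/krzemienski/ralph-orchestrator | src/ralph_orchestrator/onboarding/pattern_extractor.py | _describe_workflow
-- ===== SOURCE A (Python) =====
-- from typing import Any, Dict, List, Optional
--
-- def _describe_workflow(steps: List[str]) -> str:
--     """Generate a human-readable description for a workflow.
--
--     Args:
--         steps: List of tool names in the workflow
--
--     Returns:
--         Description of what the workflow does
--     """
--     if not steps:
--         return ""
--
--     tool_descriptions = {
--         "Read": "read files",
--         "Edit": "edit code",
--         "Write": "write files",
--         "Bash": "run commands",
--         "Glob": "find files",
--         "Grep": "search content",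
--     }
--
--     descriptions = []
--     seen = set()
--     for tool in steps:
--         if tool in tool_descriptions and tool not in seen:
--             descriptions.append(tool_descriptions[tool])
--             seen.add(tool)
--
--     if descriptions:
--         return ", ".join(descriptions)
--     return f"Uses: {', '.join(steps[:3])}"
-- ===== SOURCE B (Python) =====
-- from typing import List
--
--
-- def _describe_workflow(steps: List[str]) -> str:
--     """Generate a human-readable description for a workflow.
--
--     Instead of scanning `steps` while maintaining a seen-set, scan the fixed
--     description table: locate each known tool's first occurrence in `steps`,
--     then sort the hits by that position to recover first-occurrence order.
--     """
--     if not steps: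
--         return ""
--
--     tool_descriptions = {
--         "Read": "read files",
--         "Edit": "edit code",
--         "Write": "write files",
--         "Bash": "run commands",
--         "Glob": "find files",
--         "Grep": "search content",
--     }
--
--     found = [(steps.index(name), desc)
--              for name, desc in tool_descriptions.items() if name in steps]
--     found.sort(key=lambda p: p[0])
--
--     if found:
--         return ", ".join(desc for _, desc in found)
--     return f"Uses: {', '.join(steps[:3])}"
-- ===== Notes on version B (the rewrite author's own statement) =====
-- stated objective: alternative
-- what changed: Instead of A's single scan over steps with a seen-set, B scans the fixed six-entry description table, records each known tool's first-occurrence position via steps.index, and sorts the hits by position to recover first-occurrence order.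
import Mathlib
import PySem

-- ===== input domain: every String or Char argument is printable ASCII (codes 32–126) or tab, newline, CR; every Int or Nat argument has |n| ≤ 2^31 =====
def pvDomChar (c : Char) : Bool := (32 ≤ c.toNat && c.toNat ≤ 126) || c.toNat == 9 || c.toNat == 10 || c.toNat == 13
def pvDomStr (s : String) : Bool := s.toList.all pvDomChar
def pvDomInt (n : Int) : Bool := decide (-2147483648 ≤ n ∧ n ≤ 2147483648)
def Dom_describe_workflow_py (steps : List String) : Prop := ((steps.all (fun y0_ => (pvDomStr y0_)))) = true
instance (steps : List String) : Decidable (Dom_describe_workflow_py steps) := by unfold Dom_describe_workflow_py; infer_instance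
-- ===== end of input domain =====

-- B replaces A's seen-set scan over steps by a scan over the fixed description table
-- (first-occurrence position via steps.index, then a sort by position); same cost, different algorithm.

-- ===== PORT A =====
-- The tool_descriptions dict literal, shared by both ports.
def pvToolDescs : PySem.Dict String String :=
  PySem.Dict.ofList [("Read", "read files"), ("Edit", "edit code"), ("Write", "write files"),
    ("Bash", "run commands"), ("Glob", "find files"), ("Grep", "search content")]

-- the body of A's 'for tool in steps' loop, state = (descriptions, seen)
def pvStep (st : List String × PySem.Set String) (tool : String) :
    List String × PySem.Set String :=
  if pvToolDescs.contains tool && !(PySem.Set.contains st.2 tool) then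
    -- tool_descriptions[tool] cannot raise here (contains was just checked), so getD is exact
    (st.1 ++ [pvToolDescs.getD tool ""], PySem.Set.add st.2 tool)
  else st

def describe_workflow_py (steps : List String) : String :=
  if steps = [] then ""
  else
    -- descriptions = []; seen = set(); for tool in steps: …
    let st := steps.foldl pvStep ([], PySem.Set.empty)
    if st.1 ≠ [] then PySem.Str.join ", " st.1
    else "Uses: " ++ PySem.Str.join ", " (PySem.List.slice steps none (some 3))

-- ===== PORT B =====
-- found = [(steps.index(name), desc) for name, desc in tool_descriptions.items() if name in steps]
-- (the 'name in steps' guard makes steps.index(name) non-raising, so .map over index? is exact)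
def pvFound (steps : List String) : List (Nat × String) :=
  pvToolDescs.items.filterMap (fun p =>
    if p.1 ∈ steps then (PySem.List.index? steps p.1).map (fun i => (i, p.2)) else none)

def describe_workflow_py_alt (steps : List String) : String :=
  if steps = [] then ""
  else
    -- found.sort(key=lambda p: p[0])
    let found := PySem.List.sorted (pvFound steps) (fun p => p.1)
    if found ≠ [] then PySem.Str.join ", " (found.map (fun p => p.2))
    else "Uses: " ++ PySem.Str.join ", " (PySem.List.slice steps none (some 3))

-- ===== PRECONDITION & SPEC =====
def Spec_describe_workflow_py (steps : List String) (out : String) : Prop := out = describe_workflow_py_alt steps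
instance (steps : List String) (out : String) : Decidable (Spec_describe_workflow_py steps out) := by unfold Spec_describe_workflow_py; infer_instance

-- ===== CLAIM (what is proved, stated in full; the proofs are below) =====
def Claim_equal_describe_workflow_py : Prop := ∀ (steps : List String), Dom_describe_workflow_py steps → Spec_describe_workflow_py steps (describe_workflow_py steps)

-- ===== LEMMAS AND PROOFS =====

theorem pvContains_eq (s : List String) (x : String) :
    PySem.Set.contains s x = decide (x ∈ s) := List.contains_eq_mem ..

-- ---- A-side: the fused loop produces (dedup steps).filterMap get? ----

-- First occurrences of `steps` that are not already in `acc` (the "new" part of a Set fold).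
def pvFnew (acc : List String) : List String → List String
  | [] => []
  | t :: ts => if PySem.Set.contains acc t then pvFnew acc ts else t :: pvFnew (acc ++ [t]) ts

theorem pvFoldAdd_eq (steps : List String) : ∀ acc : List String,
    steps.foldl PySem.Set.add acc = acc ++ pvFnew acc steps := by
  induction steps with
  | nil => intro acc; simp [pvFnew]
  | cons t ts ih =>
    intro acc
    by_cases h : PySem.Set.contains acc t
    · have hadd : PySem.Set.add acc t = acc := by
        show (if PySem.Set.contains acc t = true then acc else acc ++ [t]) = acc
        rw [if_pos h]
      simp only [List.foldl_cons, hadd, pvFnew, h, if_true]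
      exact ih acc
    · have hadd : PySem.Set.add acc t = acc ++ [t] := by
        show (if PySem.Set.contains acc t = true then acc else acc ++ [t]) = acc ++ [t]
        rw [if_neg h]
      simp only [List.foldl_cons, hadd, pvFnew, h, Bool.false_eq_true, if_false]
      rw [ih (acc ++ [t])]
      simp

theorem pvLoop_eq (steps : List String) : ∀ (ds seen acc : List String),
    (∀ t : String, PySem.Set.contains seen t =
      (PySem.Set.contains acc t && (pvToolDescs.get? t).isSome)) →
    (steps.foldl pvStep (ds, seen)).1
    = ds ++ (pvFnew acc steps).filterMap (fun t => pvToolDescs.get? t) := by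
  induction steps with
  | nil => intro ds seen acc _; simp [pvFnew]
  | cons t ts ih =>
    intro ds seen acc hinv
    have hc : pvToolDescs.contains t = (pvToolDescs.get? t).isSome :=
      PySem.Dict.contains_eq_isSome_get? _ _
    cases hg : pvToolDescs.get? t with
    | none =>
      have hskip : pvToolDescs.contains t = false := by rw [hc, hg]; rfl
      have hstep : pvStep (ds, seen) t = (ds, seen) := by
        unfold pvStep; rw [hskip]; simp
      rw [List.foldl_cons, hstep]
      by_cases ha : PySem.Set.contains acc t
      · have ham : t ∈ acc := by rw [pvContains_eq] at ha; simpa using ha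
        rw [ih ds seen acc hinv]
        simp [pvFnew, ham]
      · have ham : t ∉ acc := by rw [pvContains_eq] at ha; simpa using ha
        rw [ih ds seen (acc ++ [t]) ?_]
        · simp [pvFnew, ham, hg]
        · intro u
          by_cases hut : u = t
          · subst hut
            have h0 : (pvToolDescs.get? u).isSome = false := by rw [hg]; rfl
            rw [hinv u, h0]; simp
          · rw [hinv u, pvContains_eq (acc ++ [t]) u, pvContains_eq acc u]
            simp [hut]
    | some v =>
      have hin : pvToolDescs.contains t = true := by rw [hc, hg]; rfl
      by_cases hs : PySem.Set.contains seen t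
      · have ha : PySem.Set.contains acc t = true := by
          have h0 := hinv t
          rw [hg] at h0
          simp only [Option.isSome_some, Bool.and_true] at h0
          rw [← h0]; exact hs
        have hstep : pvStep (ds, seen) t = (ds, seen) := by
          unfold pvStep; rw [hin, hs]; simp
        have ham : t ∈ acc := by rw [pvContains_eq] at ha; simpa using ha
        rw [List.foldl_cons, hstep, ih ds seen acc hinv]
        simp [pvFnew, ham]
      · have ha : PySem.Set.contains acc t = false := by
          have h0 := hinv t
          rw [hg] at h0
          simp only [Option.isSome_some, Bool.and_true] at h0
          rw [← h0]
          simpa using hs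
        have hgd : pvToolDescs.getD t "" = v := by
          simp [PySem.Dict.getD_eq_get?_getD, hg]
        have hstep : pvStep (ds, seen) t = (ds ++ [v], PySem.Set.add seen t) := by
          unfold pvStep
          rw [hin]
          simp only [hs, Bool.not_false, Bool.and_true, if_true, hgd]
        have ham : t ∉ acc := by rw [pvContains_eq] at ha; simpa using ha
        rw [List.foldl_cons, hstep, ih (ds ++ [v]) (PySem.Set.add seen t) (acc ++ [t]) ?_]
        · simp [pvFnew, ham, hg]
        · intro u
          by_cases hut : u = t
          · subst hut
            have h1 : PySem.Set.contains (PySem.Set.add seen u) u = true := by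
              rw [pvContains_eq]
              simp [PySem.Set.mem_add]
            have h2 : PySem.Set.contains (acc ++ [u]) u = true := by
              rw [pvContains_eq]; simp
            rw [h1, h2, hg]; rfl
          · have h1 : PySem.Set.contains (PySem.Set.add seen t) u =
                PySem.Set.contains seen u := by
              rw [pvContains_eq, pvContains_eq]
              simp [PySem.Set.mem_add, hut]
            have h2 : PySem.Set.contains (acc ++ [t]) u = PySem.Set.contains acc u := by
              rw [pvContains_eq, pvContains_eq]
              simp [hut]
            rw [h1, h2]; exact hinv u

theorem pvDescs_eq (steps : List String) :
    (steps.foldl pvStep ([], PySem.Set.empty)).1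
    = (PySem.List.dedup steps).filterMap (fun t => pvToolDescs.get? t) := by
  rw [pvLoop_eq steps [] PySem.Set.empty []
    (by intro t; rw [pvContains_eq, pvContains_eq]; simp [PySem.Set.empty])]
  rw [PySem.List.dedup_eq_ofList]
  show _ = (List.foldl PySem.Set.add PySem.Set.empty steps).filterMap _
  rw [pvFoldAdd_eq steps PySem.Set.empty]
  rfl

-- ---- B-side: the sorted table scan produces the same list ----

-- B's sort target, written as a map over the deduplicated steps (proof-only).
def pvL (steps : List String) : List (Nat × String) :=
  (PySem.List.dedup steps).filterMap (fun t =>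
    match PySem.List.index? steps t, pvToolDescs.get? t with
    | some i, some d => some (i, d)
    | _, _ => none)

theorem pvIndex?_inj {steps : List String} {a b : String} {i : Nat}
    (ha : PySem.List.index? steps a = some i) (hb : PySem.List.index? steps b = some i) :
    a = b := by
  obtain ⟨hk, hae, -⟩ := PySem.List.getElem_of_index?_eq_some ha
  obtain ⟨hk', hbe, -⟩ := PySem.List.getElem_of_index?_eq_some hb
  rw [← hae, ← hbe]

theorem pvGet?_iff (t d : String) :
    pvToolDescs.get? t = some d ↔ (t, d) ∈ pvToolDescs.items := by
  have h : pvToolDescs = PySem.Dict.mk [("Read", "read files"), ("Edit", "edit code"), ("Write", "write files"),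
    ("Bash", "run commands"), ("Glob", "find files"), ("Grep", "search content")] := by decide
  have hnil : ∀ s : String, (PySem.Dict.mk ([] : List (String × String))).get? s = none := fun _ => rfl
  rw [h]
  simp only [PySem.Dict.get?_mk_cons, beq_iff_eq]
  show _ ↔ (t, d) ∈ [("Read", "read files"), ("Edit", "edit code"), ("Write", "write files"),
    ("Bash", "run commands"), ("Glob", "find files"), ("Grep", "search content")]
  split_ifs with h1 h2 h3 h4 h5 h6 <;>
    (try simp only [hnil]) <;> simp_all [eq_comm]

theorem pvMem_found (steps : List String) (i : Nat) (d : String) :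
    (i, d) ∈ pvFound steps ↔
      ∃ n, (n, d) ∈ pvToolDescs.items ∧ PySem.List.index? steps n = some i := by
  unfold pvFound
  rw [List.mem_filterMap]
  constructor
  · rintro ⟨⟨n, dd⟩, hmem, hf⟩
    by_cases hn : n ∈ steps
    · simp only [hn, if_true, Option.map_eq_some_iff] at hf
      obtain ⟨j, hj, he⟩ := hf
      simp only [Prod.mk.injEq] at he
      obtain ⟨rfl, rfl⟩ := he
      exact ⟨n, hmem, hj⟩
    · simp [hn] at hf
  · rintro ⟨n, hmem, hidx⟩
    have hn : n ∈ steps := PySem.List.index?_isSome_iff .. |>.mp (by rw [hidx]; rfl)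
    exact ⟨(n, d), hmem, by rw [if_pos hn, hidx]; rfl⟩

theorem pvMem_L (steps : List String) (i : Nat) (d : String) :
    (i, d) ∈ pvL steps ↔
      ∃ n, (n, d) ∈ pvToolDescs.items ∧ PySem.List.index? steps n = some i := by
  unfold pvL
  rw [List.mem_filterMap]
  constructor
  · rintro ⟨t, hmem, hf⟩
    cases hidx : PySem.List.index? steps t with
    | none => rw [hidx] at hf; simp at hf
    | some j =>
      cases hg : pvToolDescs.get? t with
      | none => rw [hidx, hg] at hf; simp at hf
      | some dd =>
        rw [hidx, hg] at hf
        simp only [Option.some_inj, Prod.mk.injEq] at hf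
        obtain ⟨rfl, rfl⟩ := hf
        exact ⟨t, (pvGet?_iff ..).mp hg, hidx⟩
  · rintro ⟨n, hmem, hidx⟩
    have hn : n ∈ steps := PySem.List.index?_isSome_iff .. |>.mp (by rw [hidx]; rfl)
    refine ⟨n, ?_, ?_⟩
    · rw [PySem.List.mem_dedup]; exact hn
    · rw [hidx, (pvGet?_iff n d).mpr hmem]

theorem pvFnew_not_mem (l : List String) : ∀ (acc : List String) (y : String),
    y ∈ pvFnew acc l → y ∉ acc := by
  induction l with
  | nil => intro acc y h; simp [pvFnew] at h
  | cons t ts ih =>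
    intro acc y h
    unfold pvFnew at h
    by_cases hc : PySem.Set.contains acc t
    · rw [if_pos hc] at h; exact ih acc y h
    · rw [if_neg hc] at h
      rcases List.mem_cons.mp h with rfl | h'
      · rw [pvContains_eq] at hc; simpa using hc
      · intro hy
        exact ih (acc ++ [t]) y h' (by simp [hy])

theorem pvFnew_pairwise (l : List String) : ∀ acc : List String,
    (pvFnew acc l).Pairwise (fun a b => ∀ i j,
      PySem.List.index? l a = some i → PySem.List.index? l b = some j → i < j) := by
  induction l with
  | nil => intro acc; simp [pvFnew]
  | cons t ts ih =>
    intro acc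
    unfold pvFnew
    by_cases hc : PySem.Set.contains acc t
    · rw [if_pos hc]
      have ht : t ∈ acc := by rw [pvContains_eq] at hc; simpa using hc
      refine (ih acc).imp_of_mem ?_
      intro a b ha hb hab i j hi hj
      have hat : t ≠ a := fun he => pvFnew_not_mem ts acc a ha (he ▸ ht)
      have hbt : t ≠ b := fun he => pvFnew_not_mem ts acc b hb (he ▸ ht)
      rw [PySem.List.index?_cons_of_ne ts hat, Option.map_eq_some_iff] at hi
      rw [PySem.List.index?_cons_of_ne ts hbt, Option.map_eq_some_iff] at hj
      obtain ⟨i', hi', rfl⟩ := hi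
      obtain ⟨j', hj', rfl⟩ := hj
      exact Nat.add_lt_add_right (hab i' j' hi' hj') 1
    · rw [if_neg hc]
      refine List.Pairwise.cons ?_ ?_
      · intro b hb i j hi hj
        have hbt : t ≠ b := fun he =>
          pvFnew_not_mem ts (acc ++ [t]) b hb (by simp [he])
        rw [PySem.List.index?_cons_self] at hi
        rw [PySem.List.index?_cons_of_ne ts hbt, Option.map_eq_some_iff] at hj
        obtain ⟨j', hj', rfl⟩ := hj
        obtain rfl : (0 : Nat) = i := Option.some.inj hi
        omega
      · refine (ih (acc ++ [t])).imp_of_mem ?_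
        intro a b ha hb hab i j hi hj
        have hat : t ≠ a := fun he =>
          pvFnew_not_mem ts (acc ++ [t]) a ha (by simp [he])
        have hbt : t ≠ b := fun he =>
          pvFnew_not_mem ts (acc ++ [t]) b hb (by simp [he])
        rw [PySem.List.index?_cons_of_ne ts hat, Option.map_eq_some_iff] at hi
        rw [PySem.List.index?_cons_of_ne ts hbt, Option.map_eq_some_iff] at hj
        obtain ⟨i', hi', rfl⟩ := hi
        obtain ⟨j', hj', rfl⟩ := hj
        exact Nat.add_lt_add_right (hab i' j' hi' hj') 1

theorem pvDedupIdx (steps : List String) :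
    (PySem.List.dedup steps).Pairwise (fun a b => ∀ i j,
      PySem.List.index? steps a = some i → PySem.List.index? steps b = some j → i < j) := by
  rw [PySem.List.dedup_eq_ofList]
  show (List.foldl PySem.Set.add PySem.Set.empty steps).Pairwise _
  rw [pvFoldAdd_eq steps PySem.Set.empty]
  exact pvFnew_pairwise steps []

theorem pvG_inv (steps : List String) (t : String) (i : Nat) (d : String)
    (h : (match PySem.List.index? steps t, pvToolDescs.get? t with
      | some i, some d => some ((i : Nat), d)
      | _, _ => none) = some (i, d)) :
    PySem.List.index? steps t = some i ∧ pvToolDescs.get? t = some d := by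
  cases hidx : PySem.List.index? steps t with
  | none => rw [hidx] at h; simp at h
  | some j =>
    cases hg : pvToolDescs.get? t with
    | none => rw [hidx, hg] at h; simp at h
    | some dd =>
      rw [hidx, hg] at h
      simp only [Option.some_inj, Prod.mk.injEq] at h
      obtain ⟨rfl, rfl⟩ := h
      exact ⟨rfl, rfl⟩

theorem pvL_pairwise (steps : List String) :
    (pvL steps).Pairwise (fun p q => p.1 < q.1) := by
  unfold pvL
  rw [List.pairwise_filterMap]
  refine (pvDedupIdx steps).imp ?_
  intro a b hab ⟨i, d⟩ hi ⟨j, e⟩ hj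
  obtain ⟨hia, -⟩ := pvG_inv steps a i d hi
  obtain ⟨hjb, -⟩ := pvG_inv steps b j e hj
  exact hab i j hia hjb

theorem pvFound_nodup (steps : List String) : (pvFound steps).Nodup := by
  have hkeys : pvToolDescs.items.Pairwise (fun p q => p.1 ≠ q.1) := by decide
  unfold pvFound
  show List.Pairwise _ _
  rw [List.pairwise_filterMap]
  refine hkeys.imp ?_
  intro p q hpq ⟨i, d⟩ hi ⟨j, e⟩ hj he
  obtain ⟨rfl, rfl⟩ : i = j ∧ d = e := by
    simpa [Prod.ext_iff] using he
  by_cases hp : p.1 ∈ steps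
  · by_cases hq : q.1 ∈ steps
    · rw [if_pos hp, Option.map_eq_some_iff] at hi
      rw [if_pos hq, Option.map_eq_some_iff] at hj
      obtain ⟨i', hi', hpe⟩ := hi
      obtain ⟨j', hj', hqe⟩ := hj
      obtain ⟨rfl, -⟩ : i' = i ∧ p.2 = d := by simpa [Prod.ext_iff] using hpe
      obtain ⟨rfl, -⟩ : j' = i' ∧ q.2 = d := by simpa [Prod.ext_iff] using hqe
      exact hpq (pvIndex?_inj hi' hj')
    · rw [if_neg hq] at hj; simp at hj
  · rw [if_neg hp] at hi; simp at hi

theorem pvSorted_found (steps : List String) :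
    PySem.List.sorted (pvFound steps) (fun p => p.1) = pvL steps := by
  apply PySem.List.sorted_eq_of_perm_of_pairwise_lt
  · have hnd : (pvL steps).Nodup := by
      have h := (pvL_pairwise steps).imp
        (S := fun p q : Nat × String => p ≠ q)
        (fun h he => absurd (congrArg Prod.fst he) (Nat.ne_of_lt h))
      exact h
    rw [List.perm_ext_iff_of_nodup hnd (pvFound_nodup steps)]
    intro ⟨i, d⟩
    rw [pvMem_L, pvMem_found]
  · exact pvL_pairwise steps

theorem pvMapSnd_aux (steps : List String) : ∀ D : List String, (∀ t ∈ D, t ∈ steps) →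
    ((D.filterMap (fun t =>
      match PySem.List.index? steps t, pvToolDescs.get? t with
      | some i, some d => some (i, d)
      | _, _ => none)).map (fun p => p.2))
    = D.filterMap (fun t => pvToolDescs.get? t) := by
  intro D
  induction D with
  | nil => intro _; rfl
  | cons t D ih =>
    intro hmem
    have ht : t ∈ steps := hmem t (List.mem_cons_self ..)
    have hsome : (PySem.List.index? steps t).isSome :=
      (PySem.List.index?_isSome_iff ..).mpr ht
    rw [List.filterMap_cons, List.filterMap_cons]
    cases hidx : PySem.List.index? steps t with
    | none => rw [hidx] at hsome; simp at hsome
    | some i =>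
      cases hg : pvToolDescs.get? t with
      | none => simpa [hg] using ih (fun u hu => hmem u (List.mem_cons_of_mem t hu))
      | some d =>
        simpa [hg] using ih (fun u hu => hmem u (List.mem_cons_of_mem t hu))

theorem pvL_map_snd (steps : List String) :
    (pvL steps).map (fun p => p.2)
      = (PySem.List.dedup steps).filterMap (fun t => pvToolDescs.get? t) := by
  unfold pvL
  exact pvMapSnd_aux steps (PySem.List.dedup steps)
    (fun t ht => (PySem.List.mem_dedup ..).mp ht)

-- ===== VERDICT (by name: the statement is the Claim_ definition above) =====
theorem describe_workflow_py_spec : Claim_equal_describe_workflow_py := by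
  intro steps _
  unfold Spec_describe_workflow_py describe_workflow_py describe_workflow_py_alt
  by_cases h : steps = []
  · simp [h]
  · simp only [h, if_false]
    rw [pvDescs_eq steps, pvSorted_found steps, ← pvL_map_snd steps]
    by_cases hL : pvL steps = []
    · simp [hL]
    · simp [hL]
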